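-- pv_equiv track=rewrite | github.com/RobbeW/Data_Statistiek_R | Deel 3 Algoritmiek/04 Gretige algoritmen/17 Frigo/solution/solution.nl_slow.py | frigo
-- ===== SOURCE A (Python) =====
-- def frigo(cijfers):
--     dict = {}
--     for digit in cijfers:
--         if digit in dict:
--             dict[digit] += 1
--         else:
--             dict[digit] = 1
--
--     i = 1
--     while True:
--         num = list(map(int, str(i)))
--         new_dict = {}
--         for digit in num:
--             if digit in new_dict:
--                 new_dict[digit] += 1
--             else:
--                 new_dict[digit] = 1
--
--         for digit, value in new_dict.items():
--             if digit not in dict or dict[digit] < value: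
--                 return i
--
--         i += 1
-- ===== SOURCE B (Python) =====
-- def frigo(cijfers):
--     counts = [0] * 10
--     for x in cijfers:
--         if 0 <= x <= 9:
--             counts[x] += 1
--     # smallest number that needs counts[0]+1 zeros: 1 followed by that many zeros
--     best = 10 ** (counts[0] + 1)
--     for d in range(1, 10):
--         # smallest number that needs counts[d]+1 copies of d: d repeated that often
--         repunit = (10 ** (counts[d] + 1) - 1) // 9
--         best = min(best, d * repunit)
--     return best
-- ===== Notes on version B (the rewrite author's own statement) =====
-- stated objective: faster
-- what changed: Instead of testing candidates 1,2,3,... against digit counts until one fails, B counts each digit once and returns the minimum over digits d of the smallest number that needs one more copy of d than supplied (d repeated count+1 times, or 10^(count+1) for d=0).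
import Mathlib
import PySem

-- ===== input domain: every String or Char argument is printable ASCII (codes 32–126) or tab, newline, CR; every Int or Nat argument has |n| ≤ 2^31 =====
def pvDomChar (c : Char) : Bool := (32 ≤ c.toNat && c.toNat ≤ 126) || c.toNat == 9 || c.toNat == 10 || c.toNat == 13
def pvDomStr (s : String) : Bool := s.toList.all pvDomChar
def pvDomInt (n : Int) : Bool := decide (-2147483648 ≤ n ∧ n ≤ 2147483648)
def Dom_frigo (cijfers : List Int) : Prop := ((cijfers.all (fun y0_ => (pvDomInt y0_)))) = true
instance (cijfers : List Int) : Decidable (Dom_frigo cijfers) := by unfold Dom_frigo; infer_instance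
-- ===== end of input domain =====

-- B replaces A's try-1,2,3,... search by a closed form: count each digit once and take the
-- minimum over digits d of the smallest number needing one more copy of d than supplied (faster).


-- ===== PORT A =====
-- int(c) for a single character; exact for the decimal digit characters str(i), i ≥ 1, produces
def pyIntOfChar (c : Char) : Int := (PySem.Int.ofChars? [c]).getD 0

-- A's dict-counting loop (its code appears twice in A's source, for cijfers and for num)
def frigoCountLoop (xs : List Int) (d0 : PySem.Dict Int Int) : PySem.Dict Int Int :=
  xs.foldl (fun dict digit =>
    if dict.contains digit then dict.insert digit (dict.getD digit 0 + 1)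
    else dict.insert digit 1) d0

-- A's 'while True' loop; the fuel 10^(len+1) is an upper bound on the iterations actually
-- performed, proved sufficient below (the loop always returns before exhausting it)
def frigoLoop (dict : PySem.Dict Int Int) : Nat → Int → Int
  | 0, i => i
  | fuel+1, i =>
    let num := (PySem.Int.toStr i).toList.map pyIntOfChar
    let newDict := frigoCountLoop num PySem.Dict.empty
    if newDict.items.any (fun p => !dict.contains p.1 || decide (dict.getD p.1 0 < p.2)) then i
    else frigoLoop dict fuel (i+1)

def frigo (cijfers : List Int) : Int :=
  frigoLoop (frigoCountLoop cijfers PySem.Dict.empty) (10 ^ (cijfers.length + 1)) 1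

-- ===== PORT B =====
def frigo_alt (cijfers : List Int) : Int :=
  let counts := cijfers.foldl (fun cs x =>
    if 0 ≤ x ∧ x ≤ 9 then PySem.List.pySetD cs x (PySem.List.pyGetD cs x 0 + 1) else cs)
    (List.replicate 10 (0 : Int))
  -- the exponents counts[_]+1 are ≥ 1, so .toNat is exact for Python's **
  let best := (10 : Int) ^ (PySem.List.pyGetD counts 0 0 + 1).toNat
  (PySem.List.pyRange 1 10 1).foldl (fun best d =>
    min best (d * PySem.Int.floordiv ((10 : Int) ^ (PySem.List.pyGetD counts d 0 + 1).toNat - 1) 9))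
    best

-- ===== PRECONDITION & SPEC =====
def Spec_frigo (cijfers : List Int) (out : Int) : Prop := out = frigo_alt cijfers
instance (cijfers : List Int) (out : Int) : Decidable (Spec_frigo cijfers out) := by unfold Spec_frigo; infer_instance

-- ===== CLAIM (what is proved, stated in full; the proofs are below) =====
def Claim_equal_frigo : Prop := ∀ (cijfers : List Int), Dom_frigo cijfers → Spec_frigo cijfers (frigo cijfers)

-- ===== LEMMAS AND PROOFS =====

-- ---- A-side: the counting dict is a counter ----
lemma frigoCountLoop_eq_counter (xs : List Int) :
    frigoCountLoop xs PySem.Dict.empty = PySem.Dict.counter xs := by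
  rw [frigoCountLoop,
    PySem.List.foldl_congr_mem xs _ (fun d x => d.insert x (d.getD x 0 + 1)) _ ?_,
    PySem.Dict.foldl_insert_getD_add_one_eq_counter]
  intro acc x _
  by_cases h : acc.contains x
  · rw [if_pos h]
  · rw [if_neg h]
    beta_reduce
    rw [PySem.Dict.getD_of_not_contains _ _ (by simpa using h)]
    norm_num

-- the per-iteration membership test of A's loop, in closed form
lemma frigoCheck_iff (dict : PySem.Dict Int Int) (num : List Int) :
    ((frigoCountLoop num PySem.Dict.empty).items.any
        (fun p => !dict.contains p.1 || decide (dict.getD p.1 0 < p.2))) = true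
      ↔ ∃ d ∈ num, dict.getD d 0 < (num.count d : Int) := by
  rw [frigoCountLoop_eq_counter, PySem.Dict.items_counter]
  simp only [List.any_map, List.any_eq_true]
  constructor
  · rintro ⟨k, hk, hp⟩
    refine ⟨k, (PySem.Set.mem_ofList num k).1 hk, ?_⟩
    simp only [Function.comp, Bool.or_eq_true, Bool.not_eq_true', decide_eq_true_eq] at hp
    rcases hp with h | h
    · rw [PySem.Dict.getD_of_not_contains _ _ h]
      have hm : k ∈ num := (PySem.Set.mem_ofList num k).1 hk
      exact_mod_cast Nat.pos_of_ne_zero (by simpa [List.count_eq_zero] using hm)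
    · exact h
  · rintro ⟨d, hd, h⟩
    refine ⟨d, (PySem.Set.mem_ofList num d).2 hd, ?_⟩
    simp only [Function.comp, Bool.or_eq_true, decide_eq_true_eq]
    right; exact h

-- the check of A's loop at candidate j, as one Bool (proof abbreviation)
def frigoCheckB (dict : PySem.Dict Int Int) (j : Int) : Bool :=
  (frigoCountLoop ((PySem.Int.toStr j).toList.map pyIntOfChar) PySem.Dict.empty).items.any
    (fun p => !dict.contains p.1 || decide (dict.getD p.1 0 < p.2))

-- A's loop returns the least candidate passing the check, given enough fuel
lemma frigoLoop_eq (dict : PySem.Dict Int Int) (t : Int) :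
    ∀ (fuel : Nat) (i : Int), i ≤ t → t < i + fuel →
    (∀ j, i ≤ j → j < t → frigoCheckB dict j = false) →
    frigoCheckB dict t = true →
    frigoLoop dict fuel i = t := by
  intro fuel
  induction fuel with
  | zero => intro i h1 h2; omega
  | succ f ih =>
    intro i h1 h2 hbelow ht
    rw [frigoLoop]
    rcases eq_or_lt_of_le h1 with he | hlt
    · rw [← he] at ht
      simp only [frigoCheckB] at ht
      rw [if_pos ht]
      exact he
    · have hfalse : frigoCheckB dict i = false := hbelow i le_rfl hlt
      simp only [frigoCheckB] at hfalse
      rw [if_neg (by rw [Bool.not_eq_true]; exact hfalse)]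
      exact ih (i+1) (by omega) (by push_cast at h2 ⊢; omega)
        (fun j hj1 hj2 => hbelow j (by omega) hj2) ht

-- ---- digit characters of a positive number ----
lemma toDigitsCore_eq (fuel : Nat) : ∀ (n : Nat) (acc : List Char), n < fuel → 0 < n →
    Nat.toDigitsCore 10 fuel n acc = ((Nat.digits 10 n).map Nat.digitChar).reverse ++ acc := by
  induction fuel with
  | zero => intro n acc h; omega
  | succ f ih =>
    intro n acc h hn
    rw [Nat.digits_def' (by norm_num) hn]
    simp only [Nat.toDigitsCore]
    by_cases h0 : n / 10 = 0
    · rw [if_pos h0, h0, Nat.digits_zero]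
      simp
    · have hlt : n / 10 < f := by
        have := Nat.div_lt_self hn (show 1 < 10 by norm_num); omega
      rw [if_neg h0, ih (n / 10) _ hlt (by omega)]
      simp

lemma toDigits_eq_digits (n : Nat) (hn : 0 < n) :
    Nat.toDigits 10 n = ((Nat.digits 10 n).map Nat.digitChar).reverse := by
  rw [Nat.toDigits, toDigitsCore_eq (n+1) n [] (by omega) hn, List.append_nil]

lemma pyIntOfChar_digitChar (k : Nat) (hk : k < 10) :
    pyIntOfChar (Nat.digitChar k) = (k : Int) := by
  interval_cases k <;> decide

-- ---- repunit-style arithmetic ----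
lemma ofDigits_replicate_zero (m : Nat) : Nat.ofDigits 10 (List.replicate m 0) = 0 := by
  induction m with
  | zero => simp
  | succ m ih => rw [List.replicate_succ, Nat.ofDigits_cons, ih]

lemma nine_mul_ofDigits_replicate (d m : Nat) :
    9 * Nat.ofDigits 10 (List.replicate m d) = d * (10 ^ m - 1) := by
  induction m with
  | zero => simp
  | succ m ih =>
    rw [List.replicate_succ, Nat.ofDigits_cons]
    have h1 : 1 ≤ 10 ^ m := Nat.one_le_pow _ _ (by norm_num)
    have h3 : 10 ^ (m+1) - 1 = 10 * (10 ^ m - 1) + 9 := by rw [pow_succ]; omega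
    rw [h3]
    nlinarith [ih]

lemma ofDigits_replicate_lt (d m : Nat) (hd : d < 10) :
    Nat.ofDigits 10 (List.replicate m d) < 10 ^ m :=
  Nat.ofDigits_lt_base_pow_length (by norm_num)
    (by intro x hx; rw [List.eq_of_mem_replicate hx]; exact hd) |>.trans_eq (by simp)

lemma count_digits_replicate (d m : Nat) (hd1 : 1 ≤ d) (hd : d < 10) :
    (Nat.digits 10 (Nat.ofDigits 10 (List.replicate m d))).count d = m := by
  rw [Nat.digits_ofDigits 10 (by norm_num) _
    (by intro x hx; rw [List.eq_of_mem_replicate hx]; exact hd)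
    (by intro h; rw [List.getLast_replicate]; omega)]
  simp

lemma count_digits_pow (m : Nat) :
    (Nat.digits 10 (10 ^ m)).count 0 = m := by
  have h : (10:Nat) ^ m = Nat.ofDigits 10 (List.replicate m 0 ++ [1]) := by
    rw [Nat.ofDigits_append, ofDigits_replicate_zero]
    simp
  rw [h, Nat.digits_ofDigits 10 (by norm_num) _ ?_ ?_]
  · simp [List.count_append]
  · intro x hx
    rcases List.mem_append.1 hx with h' | h'
    · rw [List.eq_of_mem_replicate h']; norm_num
    · simp at h'; omega
  · intro h
    rw [List.getLast_concat]
    norm_num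

-- if n's digits contain at least m copies of d < 10, then n ≥ the m-fold repetition of d
lemma repunit_le_of_count (d m n : Nat) (hd : d < 10)
    (h : m ≤ (Nat.digits 10 n).count d) :
    Nat.ofDigits 10 (List.replicate m d) ≤ n := by
  have hlen : m ≤ (Nat.digits 10 n).length := h.trans (List.count_le_length)
  rcases Nat.lt_or_ge n (10 ^ m) with hn | hn
  · have hle : (Nat.digits 10 n).length ≤ m := (Nat.digits_length_le_iff (by norm_num) n).2 hn
    have hml : (Nat.digits 10 n).length = m := le_antisymm hle hlen
    have hcnt : (Nat.digits 10 n).count d = (Nat.digits 10 n).length := le_antisymm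
      List.count_le_length (hml ▸ h)
    have : Nat.digits 10 n = List.replicate m d := by
      rw [List.eq_replicate_iff]
      exact ⟨hml, fun b hb => (List.count_eq_length.1 hcnt b hb).symm⟩
    calc Nat.ofDigits 10 (List.replicate m d) = n := by
          rw [← this, Nat.ofDigits_digits]
      _ ≤ n := le_rfl
  · exact (ofDigits_replicate_lt d m hd).le.trans hn

-- if n's digits contain at least m ≥ 1 zeros, then n ≥ 10^m
lemma pow_le_of_count_zero (m n : Nat) (hm : 1 ≤ m)
    (h : m ≤ (Nat.digits 10 n).count 0) : 10 ^ m ≤ n := by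
  have hne : Nat.digits 10 n ≠ [] := by
    intro he; rw [he] at h; simp at h; omega
  have hn0 : n ≠ 0 := by
    intro he; rw [he] at hne; simp at hne
  have hlast := Nat.getLast_digit_ne_zero 10 hn0
  have hsplit : Nat.digits 10 n = (Nat.digits 10 n).dropLast ++ [(Nat.digits 10 n).getLast hne] :=
    (List.dropLast_append_getLast hne).symm
  have hcnt : (Nat.digits 10 n).count 0 ≤ (Nat.digits 10 n).dropLast.length := by
    conv_lhs => rw [hsplit]
    rw [List.count_append]
    have h1 : List.count 0 [(Nat.digits 10 n).getLast hne] = 0 := by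
      simp [hlast]
    have h2 : List.count 0 (Nat.digits 10 n).dropLast ≤ (Nat.digits 10 n).dropLast.length :=
      List.count_le_length
    omega
  have hlen : m + 1 ≤ (Nat.digits 10 n).length := by
    have := List.length_dropLast (xs := Nat.digits 10 n)
    have hpos : 0 < (Nat.digits 10 n).length := List.length_pos_of_ne_nil hne
    omega
  by_contra hlt
  push Not at hlt
  have := (Nat.digits_length_le_iff (b := 10) (by norm_num) n).2 hlt
  omega

-- ---- B-side: the counts array holds the digit counts ----
lemma counts_loop (xs : List Int) : ∀ (cs : List Int), cs.length = 10 →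
    (xs.foldl (fun cs x =>
      if 0 ≤ x ∧ x ≤ 9 then PySem.List.pySetD cs x (PySem.List.pyGetD cs x 0 + 1) else cs) cs).length = 10 ∧
    ∀ (k : Nat), k < 10 →
      (xs.foldl (fun cs x =>
        if 0 ≤ x ∧ x ≤ 9 then PySem.List.pySetD cs x (PySem.List.pyGetD cs x 0 + 1) else cs) cs).getD k 0
        = cs.getD k 0 + (xs.count ((k : Nat) : Int) : Int) := by
  induction xs with
  | nil => intro cs h; exact ⟨h, fun k hk => by simp⟩
  | cons x xs ih =>
    intro cs hlen
    simp only [List.foldl_cons]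
    by_cases hx : 0 ≤ x ∧ x ≤ 9
    · have hset : PySem.List.pySetD cs x (PySem.List.pyGetD cs x 0 + 1)
          = cs.set x.toNat (cs[x.toNat]'(by omega) + 1) := by
        rw [PySem.List.pyGetD_eq_getElem cs 0 hx.1 (by rw [hlen]; norm_num; omega)]
        exact PySem.List.pySetD_of_nonneg cs _ hx.1
      rw [if_pos hx, hset]
      obtain ⟨h1, h2⟩ := ih (cs.set x.toNat (cs[x.toNat]'(by omega) + 1)) (by simp [hlen])
      refine ⟨h1, fun k hk => ?_⟩
      rw [h2 k hk]
      have hgd : (cs.set x.toNat (cs[x.toNat]'(by omega) + 1)).getD k 0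
          = if x.toNat = k then cs.getD k 0 + 1 else cs.getD k 0 := by
        have hxl : x.toNat < cs.length := by omega
        by_cases he : x.toNat = k
        · subst he
          simp [List.getD, hxl]
        · simp [List.getD, he]
      rw [hgd, List.count_cons]
      by_cases he : x.toNat = k
      · have : x = ((k:Nat):Int) := by omega
        simp [this]
        ring
      · have : ¬ (x = ((k:Nat):Int)) := by omega
        simp [he, this]
    · rw [if_neg hx]
      obtain ⟨h1, h2⟩ := ih cs hlen
      refine ⟨h1, fun k hk => ?_⟩
      rw [h2 k hk, List.count_cons]
      have : ¬ (x = ((k:Nat):Int)) := by omega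
      simp [this]

lemma repInt (d m : Nat) :
    (d : Int) * PySem.Int.floordiv ((10:Int) ^ m - 1) 9
      = (Nat.ofDigits 10 (List.replicate m d) : Int) := by
  have hr : 9 * Nat.ofDigits 10 (List.replicate m 1) = 10 ^ m - 1 := by
    simpa using nine_mul_ofDigits_replicate 1 m
  have h1 : 1 ≤ (10:Nat) ^ m := Nat.one_le_pow _ _ (by norm_num)
  have hcast : (10:Int) ^ m - 1 = ((9 * Nat.ofDigits 10 (List.replicate m 1) : Nat) : Int) := by
    rw [hr]; push_cast [h1]; ring
  rw [PySem.Int.floordiv_eq_ediv_of_pos (by norm_num), hcast]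
  push_cast
  rw [Int.mul_ediv_cancel_left _ (by norm_num)]
  have h9 : 9 * (d * Nat.ofDigits 10 (List.replicate m 1)) = 9 * Nat.ofDigits 10 (List.replicate m d) := by
    rw [nine_mul_ofDigits_replicate]
    nlinarith [nine_mul_ofDigits_replicate 1 m]
  have h2 := Nat.eq_of_mul_eq_mul_left (show 0 < 9 by norm_num) h9
  exact_mod_cast congrArg (fun n : Nat => (n : Int)) h2

-- the ten candidate answers of B, as naturals
def TN (cij : List Int) (k : Nat) : Nat :=
  if k = 0 then 10 ^ (cij.count (0:Int) + 1)
  else Nat.ofDigits 10 (List.replicate (cij.count ((k:Nat):Int) + 1) k)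

lemma toNat_succ (c : Nat) : ((c:Int) + 1).toNat = c + 1 := by omega

set_option maxHeartbeats 1000000 in
lemma alt_eq (cij : List Int) :
    frigo_alt cij = ((List.range 9).map (fun j => (TN cij (j+1) : Int))).foldl min ((TN cij 0 : Int)) := by
  obtain ⟨hlen, hget⟩ := counts_loop cij (List.replicate 10 (0:Int)) (by simp)
  have hcnt : ∀ (k : Nat), k < 10 →
      (cij.foldl (fun cs x =>
        if 0 ≤ x ∧ x ≤ 9 then PySem.List.pySetD cs x (PySem.List.pyGetD cs x 0 + 1) else cs)
        (List.replicate 10 (0:Int))).getD k 0 = (cij.count ((k:Nat):Int) : Int) := by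
    intro k hk
    rw [hget k hk]
    have : (List.replicate 10 (0:Int)).getD k 0 = 0 := by interval_cases k <;> rfl
    rw [this, zero_add]
  rw [frigo_alt]
  have hrange : PySem.List.pyRange 1 10 1 = [1,2,3,4,5,6,7,8,9] := by decide
  simp only [hrange, List.foldl_cons, List.foldl_nil, PySem.List.pyGetD_ofNat']
  rw [hcnt 0 (by norm_num), hcnt 1 (by norm_num), hcnt 2 (by norm_num), hcnt 3 (by norm_num),
    hcnt 4 (by norm_num), hcnt 5 (by norm_num), hcnt 6 (by norm_num), hcnt 7 (by norm_num),
    hcnt 8 (by norm_num), hcnt 9 (by norm_num)]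
  simp only [toNat_succ]
  rw [show List.range 9 = [0,1,2,3,4,5,6,7,8] by rfl]
  simp only [List.map_cons, List.map_nil, List.foldl_cons, List.foldl_nil, TN]
  norm_num
  have L : ∀ (d c : Nat), ((d:Nat):Int) * (((10:Int) ^ (c+1) - 1)/9)
      = (Nat.ofDigits 10 (List.replicate (c+1) d) : Int) := by
    intro d c
    rw [← PySem.Int.floordiv_eq_ediv_of_pos (by norm_num)]
    exact repInt d (c+1)
  have L1 : (((10:Int) ^ (List.count (1:Int) cij + 1) - 1)/9)
      = (Nat.ofDigits 10 (List.replicate (List.count (1:Int) cij + 1) 1) : Int) := by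
    simpa using L 1 (List.count (1:Int) cij)
  have L2 : (2:Int) * (((10:Int) ^ (List.count (2:Int) cij + 1) - 1)/9)
      = (Nat.ofDigits 10 (List.replicate (List.count (2:Int) cij + 1) 2) : Int) := by
    simpa using L 2 (List.count (2:Int) cij)
  have L3 : (3:Int) * (((10:Int) ^ (List.count (3:Int) cij + 1) - 1)/9)
      = (Nat.ofDigits 10 (List.replicate (List.count (3:Int) cij + 1) 3) : Int) := by
    simpa using L 3 (List.count (3:Int) cij)
  have L4 : (4:Int) * (((10:Int) ^ (List.count (4:Int) cij + 1) - 1)/9)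
      = (Nat.ofDigits 10 (List.replicate (List.count (4:Int) cij + 1) 4) : Int) := by
    simpa using L 4 (List.count (4:Int) cij)
  have L5 : (5:Int) * (((10:Int) ^ (List.count (5:Int) cij + 1) - 1)/9)
      = (Nat.ofDigits 10 (List.replicate (List.count (5:Int) cij + 1) 5) : Int) := by
    simpa using L 5 (List.count (5:Int) cij)
  have L6 : (6:Int) * (((10:Int) ^ (List.count (6:Int) cij + 1) - 1)/9)
      = (Nat.ofDigits 10 (List.replicate (List.count (6:Int) cij + 1) 6) : Int) := by
    simpa using L 6 (List.count (6:Int) cij)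
  have L7 : (7:Int) * (((10:Int) ^ (List.count (7:Int) cij + 1) - 1)/9)
      = (Nat.ofDigits 10 (List.replicate (List.count (7:Int) cij + 1) 7) : Int) := by
    simpa using L 7 (List.count (7:Int) cij)
  have L8 : (8:Int) * (((10:Int) ^ (List.count (8:Int) cij + 1) - 1)/9)
      = (Nat.ofDigits 10 (List.replicate (List.count (8:Int) cij + 1) 8) : Int) := by
    simpa using L 8 (List.count (8:Int) cij)
  have L9 : (9:Int) * (((10:Int) ^ (List.count (9:Int) cij + 1) - 1)/9)
      = (Nat.ofDigits 10 (List.replicate (List.count (9:Int) cij + 1) 9) : Int) := by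
    simpa using L 9 (List.count (9:Int) cij)
  rw [L1, L2, L3, L4, L5, L6, L7, L8, L9]
  norm_cast


-- the digit list A builds for candidate j ≥ 1
lemma num_eq (j : Int) (hj : 1 ≤ j) :
    (PySem.Int.toStr j).toList.map pyIntOfChar
      = ((Nat.digits 10 j.toNat).map (Nat.cast : Nat → Int)).reverse := by
  rw [PySem.Int.toList_toStr, PySem.Int.toChars, if_neg (by omega),
    toDigits_eq_digits _ (by omega), List.map_reverse]
  congr 1
  rw [List.map_map]
  apply List.map_congr_left
  intro k hk
  exact pyIntOfChar_digitChar k (Nat.digits_lt_base (by norm_num) hk)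

-- A's check at candidate j, against the digit counts of the input
lemma checkB_iff (cij : List Int) (j : Int) (hj : 1 ≤ j) :
    frigoCheckB (frigoCountLoop cij PySem.Dict.empty) j = true
      ↔ ∃ k, k < 10 ∧ cij.count ((k:Nat):Int) < (Nat.digits 10 j.toNat).count k := by
  rw [frigoCheckB, frigoCheck_iff, num_eq j hj]
  constructor
  · rintro ⟨d, hd, hlt⟩
    rw [List.mem_reverse, List.mem_map] at hd
    obtain ⟨k, hk, rfl⟩ := hd
    refine ⟨k, Nat.digits_lt_base (by norm_num) hk, ?_⟩
    rw [frigoCountLoop_eq_counter, PySem.Dict.getD_counter] at hlt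
    rw [List.count_reverse, List.count_map_of_injective _ _ Nat.cast_injective] at hlt
    exact_mod_cast hlt
  · rintro ⟨k, hk, hlt⟩
    refine ⟨(k : Int), ?_, ?_⟩
    · rw [List.mem_reverse, List.mem_map]
      exact ⟨k, List.count_pos_iff.1 (by omega), rfl⟩
    · rw [frigoCountLoop_eq_counter, PySem.Dict.getD_counter,
        List.count_reverse, List.count_map_of_injective _ _ Nat.cast_injective]
      exact_mod_cast hlt

-- B's result is one of the ten candidates and a lower bound for all of them
lemma alt_mem_le (cij : List Int) :
    (∃ k, k < 10 ∧ frigo_alt cij = (TN cij k : Int)) ∧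
    (∀ k, k < 10 → frigo_alt cij ≤ (TN cij k : Int)) := by
  rw [alt_eq]
  obtain ⟨hm, hle⟩ := (List.min?_eq_some_iff
    (xs := ((TN cij 0 : Int)) :: (List.range 9).map (fun j => (TN cij (j+1) : Int)))).1 rfl
  constructor
  · rcases List.mem_cons.1 hm with h | h
    · exact ⟨0, by norm_num, h⟩
    · obtain ⟨j, hj, he⟩ := List.mem_map.1 h
      exact ⟨j+1, by have := List.mem_range.1 hj; omega, he.symm⟩
  · intro k hk
    rcases Nat.eq_zero_or_pos k with rfl | hpos
    · exact hle _ List.mem_cons_self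
    · refine hle _ (List.mem_cons_of_mem _ (List.mem_map.2 ⟨k-1, List.mem_range.2 (by omega), ?_⟩))
      rw [Nat.sub_add_cancel hpos]

lemma TN_pos (cij : List Int) (k : Nat) : 1 ≤ TN cij k := by
  rw [TN]
  split_ifs with h
  · exact Nat.one_le_pow _ _ (by norm_num)
  · rw [List.replicate_succ, Nat.ofDigits_cons]
    have : 1 ≤ k := by omega
    omega

lemma TN_count (cij : List Int) (k : Nat) (hk : k < 10) :
    (Nat.digits 10 (TN cij k)).count k = cij.count ((k:Nat):Int) + 1 := by
  rw [TN]
  split_ifs with h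
  · subst h
    rw [count_digits_pow]
    norm_num
  · exact count_digits_replicate k _ (by omega) hk

-- ===== VERDICT (by name: the statement is the Claim_ definition above) =====
theorem frigo_spec : Claim_equal_frigo := by
  intro cij _
  show frigo cij = frigo_alt cij
  obtain ⟨⟨k0, hk0, hkeq⟩, hle⟩ := alt_mem_le cij
  have ht1 : (1:Int) ≤ frigo_alt cij := by
    rw [hkeq]; exact_mod_cast TN_pos cij k0
  rw [frigo]
  apply frigoLoop_eq _ (frigo_alt cij) _ 1 ht1
  · -- enough fuel
    have hc0 : cij.count (0:Int) ≤ cij.length := List.count_le_length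
    have hp : (10:Nat) ^ (cij.count (0:Int) + 1) ≤ 10 ^ (cij.length + 1) :=
      Nat.pow_le_pow_right (by norm_num) (by omega)
    have h0 : frigo_alt cij ≤ ((10:Nat) ^ (cij.count (0:Int) + 1) : Int) := by
      have := hle 0 (by norm_num)
      rwa [TN, if_pos rfl] at this
    have : frigo_alt cij ≤ ((10:Nat) ^ (cij.length + 1) : Int) := h0.trans (by exact_mod_cast hp)
    push_cast at this ⊢
    omega
  · -- nothing below the answer passes the check
    intro j hj1 hj2
    by_contra hb
    rw [Bool.not_eq_false, checkB_iff cij j hj1] at hb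
    obtain ⟨k, hk, hcnt⟩ := hb
    have hTle : (TN cij k : Nat) ≤ j.toNat := by
      rcases Nat.eq_zero_or_pos k with rfl | hpos
      · rw [TN, if_pos rfl]
        exact pow_le_of_count_zero _ _ (by omega) (by simpa using hcnt)
      · rw [TN, if_neg (by omega)]
        exact repunit_le_of_count k _ _ hk (by omega)
    have h1 : frigo_alt cij ≤ ((TN cij k : Nat) : Int) := hle k hk
    have h2 : ((j.toNat : Nat) : Int) = j := Int.toNat_of_nonneg (by omega)
    omega
  · -- the answer passes the check
    rw [checkB_iff cij (frigo_alt cij) ht1]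
    refine ⟨k0, hk0, ?_⟩
    have : (frigo_alt cij).toNat = TN cij k0 := by rw [hkeq]; simp
    rw [this, TN_count cij k0 hk0]
    omega
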